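-- pv_equiv track=rewrite | github.com/JadeGate/jadegate | jade_core/optimizer.py | _find_shortcuts
-- ===== SOURCE A (Python) =====
-- from typing import Any, Dict, List, Set, Optional, Tuple
--
-- def _find_shortcuts(nodes: Dict, edges: List) -> Tuple[List[Tuple[str, str]], List]:
--     """Find passthrough nodes that can be skipped."""
--     shortcuts = []
--     new_edges = list(edges)
--
--     for nid, node in list(nodes.items()):
--         action = node.get("action", "")
--         # Identity/passthrough nodes can be shortcut
--         if action in ("passthrough", "identity", "noop"):
--             incoming = [e for e in new_edges if e["to"] == nid]
--             outgoing = [e for e in new_edges if e["from"] == nid]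
--             if len(incoming) == 1 and len(outgoing) == 1:
--                 shortcuts.append((nid, outgoing[0]["to"]))
--                 # Rewire: incoming source -> outgoing target
--                 new_edges = [e for e in new_edges if e["to"] != nid and e["from"] != nid]
--                 new_edges.append({"from": incoming[0]["from"], "to": outgoing[0]["to"]})
--
--     return shortcuts, new_edges
-- ===== SOURCE B (Python) =====
-- def _find_shortcuts(nodes, edges):
--     """Find passthrough nodes that can be skipped (endpoint-indexed, built lazily)."""
--     PASS = ("passthrough", "identity", "noop")
--     store = None    # id -> edge dict, in creation order; deletion keeps order
--     in_idx = {}     # endpoint -> ids of all edges ever created with that "to"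
--     out_idx = {}    # endpoint -> ids of all edges ever created with that "from"
--     nxt = 0
--     shortcuts = []
--
--     def register(e):
--         nonlocal nxt
--         store[nxt] = e
--         in_idx.setdefault(e["to"], []).append(nxt)
--         out_idx.setdefault(e["from"], []).append(nxt)
--         nxt += 1
--
--     for nid, node in nodes.items():
--         if node.get("action", "") in PASS:
--             if store is None:           # index the edges on first demand
--                 store = {}
--                 for e in edges:
--                     register(e)
--             inc = [i for i in in_idx.get(nid, []) if i in store]
--             out = [i for i in out_idx.get(nid, []) if i in store]
--             if len(inc) == 1 and len(out) == 1:
--                 src = store[inc[0]]["from"]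
--                 dst = store[out[0]]["to"]
--                 shortcuts.append((nid, dst))
--                 del store[inc[0]]
--                 store.pop(out[0], None)  # same id when the edge is a self-loop
--                 register({"from": src, "to": dst})
--     return shortcuts, (list(edges) if store is None else list(store.values()))
-- ===== Notes on version B (the rewrite author's own statement) =====
-- stated objective: alternative
-- what changed: B replaces A's per-passthrough-node rescans of the whole edge list (three list comprehensions per node) by an id-keyed edge store plus 'to'/'from' endpoint indexes, built once when a passthrough node is first seen and updated incrementally, so each node costs dictionary lookups instead of full edge scans.
import Mathlib
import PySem

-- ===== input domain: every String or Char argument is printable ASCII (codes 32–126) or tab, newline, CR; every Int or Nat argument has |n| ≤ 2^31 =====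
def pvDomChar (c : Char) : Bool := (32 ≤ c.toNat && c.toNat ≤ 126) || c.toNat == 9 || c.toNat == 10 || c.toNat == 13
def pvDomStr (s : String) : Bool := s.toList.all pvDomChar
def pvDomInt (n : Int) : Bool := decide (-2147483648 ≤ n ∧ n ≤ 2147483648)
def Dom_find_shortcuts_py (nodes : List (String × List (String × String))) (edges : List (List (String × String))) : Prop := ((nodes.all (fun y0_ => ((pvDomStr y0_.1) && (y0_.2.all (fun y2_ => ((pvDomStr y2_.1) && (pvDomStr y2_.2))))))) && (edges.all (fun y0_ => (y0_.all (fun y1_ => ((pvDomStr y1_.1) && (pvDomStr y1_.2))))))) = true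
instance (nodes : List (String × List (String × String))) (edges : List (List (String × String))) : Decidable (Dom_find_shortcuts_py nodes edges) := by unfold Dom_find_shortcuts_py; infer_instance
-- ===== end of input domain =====

-- B replaces A's per-passthrough-node rescans of the whole edge list by an edge store
-- keyed by id plus "to"/"from" endpoint indexes, built once when a passthrough node is
-- first seen and updated incrementally; objective: alternative (different algorithm).

-- ===== PORT A =====
def pvActs : List String := ["passthrough", "identity", "noop"]

-- e["to"] / e["from"]; Pre_ guarantees the key is present wherever either Python reads it
def pvTo (e : PySem.Dict String String) : String := e.getD "to" ""
def pvFrom (e : PySem.Dict String String) : String := e.getD "from" ""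

-- one iteration of A's `for nid, node in list(nodes.items())` loop
def pvStepA (st : List (String × String) × List (PySem.Dict String String))
    (p : String × List (String × String)) :
    List (String × String) × List (PySem.Dict String String) :=
  if pvActs.contains ((PySem.Dict.ofList p.2).getD "action" "") then
    let incoming := st.2.filter (fun e => pvTo e == p.1)
    let outgoing := st.2.filter (fun e => pvFrom e == p.1)
    if incoming.length == 1 && outgoing.length == 1 then
      (st.1 ++ [(p.1, pvTo (outgoing.headD PySem.Dict.empty))],
       st.2.filter (fun e => !(pvTo e == p.1) && !(pvFrom e == p.1)) ++
         [PySem.Dict.ofList [("from", pvFrom (incoming.headD PySem.Dict.empty)),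
                             ("to", pvTo (outgoing.headD PySem.Dict.empty))]])
    else st
  else st

def find_shortcuts_py (nodes : List (String × List (String × String)))
    (edges : List (List (String × String))) :
    (List (String × String)) × (List (List (String × String))) :=
  let r := ((PySem.Dict.ofList nodes).items).foldl pvStepA
    ([], edges.map (fun e => PySem.Dict.ofList e))
  (r.1, r.2.map (fun e => e.items))

-- ===== PORT B =====
structure PvIdx where
  store : PySem.Dict Int (PySem.Dict String String)   -- id -> edge, in creation order
  nxt : Int                                           -- next fresh id
  inIdx : PySem.Dict String (List Int)                -- endpoint -> ids ever created with that "to"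
  outIdx : PySem.Dict String (List Int)               -- endpoint -> ids ever created with that "from"

-- B's `register(e)`
def pvRegister (st : PvIdx) (e : PySem.Dict String String) : PvIdx :=
  { store := st.store.insert st.nxt e
    nxt := st.nxt + 1
    inIdx := st.inIdx.modify (pvTo e) [] (fun l => l ++ [st.nxt])
    outIdx := st.outIdx.modify (pvFrom e) [] (fun l => l ++ [st.nxt]) }

def pvEmptyIdx : PvIdx := ⟨PySem.Dict.empty, 0, PySem.Dict.empty, PySem.Dict.empty⟩

-- the body of B's node loop after the lazy-build line
def pvStepBCore (sc : List (String × String)) (idx : PvIdx) (nid : String) :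
    List (String × String) × Option PvIdx :=
  let inc := (idx.inIdx.getD nid []).filter (fun i => idx.store.contains i)
  let out := (idx.outIdx.getD nid []).filter (fun i => idx.store.contains i)
  if inc.length == 1 && out.length == 1 then
    let src := pvFrom (idx.store.getD (inc.headD 0) PySem.Dict.empty)
    let dst := pvTo (idx.store.getD (out.headD 0) PySem.Dict.empty)
    (sc ++ [(nid, dst)],
     some (pvRegister { idx with store := (idx.store.erase (inc.headD 0)).erase (out.headD 0) }
             (PySem.Dict.ofList [("from", src), ("to", dst)])))
  else (sc, some idx)

-- one iteration of B's node loop; `none` = the index has not been built yet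
def pvStepB (edges0 : List (PySem.Dict String String))
    (st : List (String × String) × Option PvIdx)
    (p : String × List (String × String)) :
    List (String × String) × Option PvIdx :=
  if pvActs.contains ((PySem.Dict.ofList p.2).getD "action" "") then
    pvStepBCore st.1
      (match st.2 with
       | none => edges0.foldl pvRegister pvEmptyIdx
       | some i => i) p.1
  else st

def find_shortcuts_py_alt (nodes : List (String × List (String × String)))
    (edges : List (List (String × String))) :
    (List (String × String)) × (List (List (String × String))) :=
  let edges0 := edges.map (fun e => PySem.Dict.ofList e)
  let r := ((PySem.Dict.ofList nodes).items).foldl (pvStepB edges0) ([], none)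
  (r.1, ((match r.2 with
         | none => edges0
         | some idx => idx.store.values) : List (PySem.Dict String String)).map (fun e => e.items))

-- ===== PRECONDITION & SPEC =====
-- Pre_ excludes exactly the inputs on which A raises KeyError: some node has a
-- passthrough action (so the edge list is scanned) while some edge dict lacks "from" or "to".
def Pre_find_shortcuts_py (nodes : List (String × List (String × String))) (edges : List (List (String × String))) : Prop :=
  ((PySem.Dict.ofList nodes).items.any
      (fun p => (["passthrough", "identity", "noop"] : List String).contains
        ((PySem.Dict.ofList p.2).getD "action" ""))) = true →
  (edges.all (fun e => (PySem.Dict.ofList e).contains "from" && (PySem.Dict.ofList e).contains "to")) = true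
instance (nodes : List (String × List (String × String))) (edges : List (List (String × String))) : Decidable (Pre_find_shortcuts_py nodes edges) := by unfold Pre_find_shortcuts_py; infer_instance

def pvWitness_find_shortcuts_py : (List (String × List (String × String))) × (List (List (String × String))) :=
  ([("n", [("action", "passthrough")]), ("b", [])],
   [[("from", "a"), ("to", "n")], [("from", "n"), ("to", "b")]])

def Spec_find_shortcuts_py (nodes : List (String × List (String × String))) (edges : List (List (String × String))) (out : (List (String × String)) × (List (List (String × String)))) : Prop := out = find_shortcuts_py_alt nodes edges
instance (nodes : List (String × List (String × String))) (edges : List (List (String × String))) (out : (List (String × String)) × (List (List (String × String)))) : Decidable (Spec_find_shortcuts_py nodes edges out) := by unfold Spec_find_shortcuts_py; infer_instance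

-- ===== CLAIM (what is proved, stated in full; the proofs are below) =====
def Claim_equal_find_shortcuts_py : Prop := ∀ (nodes : List (String × List (String × String))) (edges : List (List (String × String))), Dom_find_shortcuts_py nodes edges → Pre_find_shortcuts_py nodes edges → Spec_find_shortcuts_py nodes edges (find_shortcuts_py nodes edges)

-- ===== LEMMAS AND PROOFS =====

def pvInv (ne : List (PySem.Dict String String)) (idx : PvIdx) : Prop :=
  ne = idx.store.items.map (fun q => q.2) ∧
  (idx.store.items.map (fun q => q.1)).Nodup ∧
  (∀ k ∈ idx.store.items.map (fun q => q.1), k < idx.nxt) ∧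
  (∀ x, ∀ i ∈ idx.inIdx.getD x [], i < idx.nxt) ∧
  (∀ x, ∀ i ∈ idx.outIdx.getD x [], i < idx.nxt) ∧
  (∀ x, (idx.inIdx.getD x []).filter (fun i => idx.store.contains i)
      = (idx.store.items.filter (fun q => pvTo q.2 == x)).map (fun q => q.1)) ∧
  (∀ x, (idx.outIdx.getD x []).filter (fun i => idx.store.contains i)
      = (idx.store.items.filter (fun q => pvFrom q.2 == x)).map (fun q => q.1))

theorem pvContains_app (idx : PvIdx) (e : PySem.Dict String String)
    (hitems : (pvRegister idx e).store.items = idx.store.items ++ [(idx.nxt, e)]) :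
    ∀ i : Int, (pvRegister idx e).store.contains i = (idx.store.contains i || i == idx.nxt) := by
  intro i
  simp only [PySem.Dict.contains, hitems, List.any_append, List.any_cons, List.any_nil]
  by_cases hi : i = idx.nxt
  · simp [hi]
  · have h1 : (idx.nxt == i) = false := by simp; omega
    have h2 : (i == idx.nxt) = false := by simp; omega
    simp [h1, h2]

theorem pvInv_reg_gen (idx : PvIdx) (e : PySem.Dict String String) (t : String)
    (dd : PySem.Dict String (List Int))
    (sel : PySem.Dict String String → String)
    (hitems : (pvRegister idx e).store.items = idx.store.items ++ [(idx.nxt, e)])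
    (h4 : ∀ y, ∀ i ∈ dd.getD y [], i < idx.nxt)
    (h6 : ∀ y, (dd.getD y []).filter (fun i => idx.store.contains i)
        = (idx.store.items.filter (fun q => sel q.2 == y)).map (fun q => q.1))
    (hsel : sel e = t) :
    ∀ x, ((dd.modify t [] (fun l => l ++ [idx.nxt])).getD x []).filter
          (fun i => (pvRegister idx e).store.contains i)
      = ((pvRegister idx e).store.items.filter (fun q => sel q.2 == x)).map (fun q => q.1) := by
  intro x
  have hcont := pvContains_app idx e hitems
  have hold : ∀ y, (dd.getD y []).filter (fun i => (pvRegister idx e).store.contains i)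
      = (dd.getD y []).filter (fun i => idx.store.contains i) := by
    intro y
    refine List.filter_congr ?_
    intro i hi
    have hlt := h4 y i hi
    rw [hcont i]
    have hne : (i == idx.nxt) = false := by simp; omega
    simp [hne]
  rw [PySem.Dict.getD_modify, hitems, List.filter_append]
  by_cases hx : x = t
  · rw [if_pos hx, ← hx, List.filter_append, hold, h6 x]
    have h1f : ([idx.nxt].filter (fun i => (pvRegister idx e).store.contains i)) = [idx.nxt] := by
      simp [hcont]
    have h2f : ([(idx.nxt, e)].filter (fun q => sel q.2 == x)) = [(idx.nxt, e)] := by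
      simp [hsel, hx]
    rw [h1f, h2f]
    simp
  · rw [if_neg hx, hold, h6 x]
    have h2f : ([(idx.nxt, e)].filter (fun q => sel q.2 == x)) = ([] : List (Int × PySem.Dict String String)) := by
      simp [hsel]; exact fun hc => hx hc.symm
    rw [h2f]
    simp

theorem pvInv_register {ne : List (PySem.Dict String String)} {idx : PvIdx}
    (h : pvInv ne idx) (e : PySem.Dict String String) :
    pvInv (ne ++ [e]) (pvRegister idx e) := by
  obtain ⟨h1, h2, h3, h4, h5, h6, h7⟩ := h
  have hfresh : idx.store.contains idx.nxt = false := by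
    simp only [PySem.Dict.contains, List.any_eq_false, beq_iff_eq]
    intro p hp hc
    exact absurd (h3 p.1 (List.mem_map_of_mem hp)) (by omega)  -- p.1 = nxt contradiction
  have hitems : (pvRegister idx e).store.items = idx.store.items ++ [(idx.nxt, e)] := by
    exact PySem.Dict.items_insert_of_not_contains _ e hfresh
  refine ⟨?_, ?_, ?_, ?_, ?_, ?_, ?_⟩
  · simp [hitems, h1]
  · simp only [hitems, List.map_append, List.map_cons, List.map_nil]
    refine List.Nodup.append h2 (List.nodup_singleton _) ?_
    intro a ha hb
    simp only [List.mem_singleton] at hb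
    exact absurd (h3 a ha) (by subst hb; omega)
  · intro k hk
    simp only [hitems, List.map_append, List.mem_append, List.map_cons, List.map_nil,
      List.mem_singleton] at hk
    rcases hk with hk | hk
    · have := h3 k hk; simp [pvRegister]; omega
    · simp [pvRegister, hk]
  · intro x i hi
    simp only [pvRegister, PySem.Dict.getD_modify] at hi
    by_cases hx : x = pvTo e
    · simp only [if_pos hx, List.mem_append, List.mem_singleton] at hi
      rcases hi with hi | hi
      · have := h4 (pvTo e) i hi; simp [pvRegister]; omega
      · simp [pvRegister, hi]
    · rw [if_neg hx] at hi
      have := h4 x i hi; simp [pvRegister]; omega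
  · intro x i hi
    simp only [pvRegister, PySem.Dict.getD_modify] at hi
    by_cases hx : x = pvFrom e
    · simp only [if_pos hx, List.mem_append, List.mem_singleton] at hi
      rcases hi with hi | hi
      · have := h5 (pvFrom e) i hi; simp [pvRegister]; omega
      · simp [pvRegister, hi]
    · rw [if_neg hx] at hi
      have := h5 x i hi; simp [pvRegister]; omega
  · exact fun x => pvInv_reg_gen idx e (pvTo e) idx.inIdx pvTo hitems h4 h6 rfl x
  · exact fun x => pvInv_reg_gen idx e (pvFrom e) idx.outIdx pvFrom hitems h5 h7 rfl x

theorem pvInv_build_gen (l : List (PySem.Dict String String))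
    {ne : List (PySem.Dict String String)} {idx : PvIdx} (h : pvInv ne idx) :
    pvInv (ne ++ l) (l.foldl pvRegister idx) := by
  induction l generalizing ne idx with
  | nil => simpa using h
  | cons e rest ih =>
    have := ih (pvInv_register h e)
    simpa using this

theorem pvInv_empty : pvInv [] pvEmptyIdx := by
  refine ⟨?_, ?_, ?_, ?_, ?_, ?_, ?_⟩ <;> simp [pvEmptyIdx, PySem.Dict.empty, PySem.Dict.getD, PySem.Dict.get?]

theorem pvInv_build (l : List (PySem.Dict String String)) :
    pvInv l (l.foldl pvRegister pvEmptyIdx) := by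
  simpa using pvInv_build_gen l pvInv_empty

theorem pv_key_inj {α : Type} {l : List (Int × α)}
    (h : (l.map (fun q => q.1)).Nodup) {a b : Int × α}
    (ha : a ∈ l) (hb : b ∈ l) (he : a.1 = b.1) : a = b := by
  exact List.inj_on_of_nodup_map h ha hb he

theorem pvContains_erase2 {ν : Type} (d : PySem.Dict Int ν) (a b i : Int) :
    ((d.erase a).erase b).contains i = (!(i == a) && !(i == b) && d.contains i) := by
  simp only [PySem.Dict.erase, PySem.Dict.contains, List.any_filter]
  by_cases ha : i = a
  · subst ha
    simp only [beq_self_eq_true, Bool.not_true, Bool.false_and]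
    rw [List.any_eq_false]
    intro p hp
    by_cases h : p.1 = i <;> simp [h]
  · by_cases hb : i = b
    · subst hb
      simp only [beq_self_eq_true, Bool.not_true, Bool.and_false, Bool.false_and]
      rw [List.any_eq_false]
      intro p hp
      by_cases h : p.1 = i <;> simp [h]
    · have ha' : (i == a) = false := by simp [ha]
      have hb' : (i == b) = false := by simp [hb]
      simp only [ha', hb', Bool.not_false, Bool.true_and]
      refine congrArg _ ?_
      funext p
      by_cases h : p.1 = i
      · have h1 : (p.1 == a) = false := by simp [h, ha]
        have h2 : (p.1 == b) = false := by simp [h, hb]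
        simp [h1, h2]
      · have h' : (p.1 == i) = false := by simp [h]
        simp [h']

theorem pvItems_erase2 {ν : Type} (d : PySem.Dict Int ν) (a b : Int) :
    ((d.erase a).erase b).items = d.items.filter (fun q => !(q.1 == a) && !(q.1 == b)) := by
  simp only [PySem.Dict.erase, List.filter_filter]
  refine List.filter_congr ?_
  intro q _
  rw [Bool.and_comm]

theorem pvInv_erase {ne : List (PySem.Dict String String)} {idx : PvIdx} {nid : String}
    {i0 o0 : Int} {einc eout : PySem.Dict String String}
    (h : pvInv ne idx)
    (hF : idx.store.items.filter (fun q => pvTo q.2 == nid) = [(i0, einc)])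
    (hG : idx.store.items.filter (fun q => pvFrom q.2 == nid) = [(o0, eout)]) :
    pvInv (ne.filter (fun e => !(pvTo e == nid) && !(pvFrom e == nid)))
      { idx with store := (idx.store.erase i0).erase o0 } := by
  obtain ⟨h1, h2, h3, h4, h5, h6, h7⟩ := h
  have hFi : (i0, einc) ∈ idx.store.items := by
    have : (i0, einc) ∈ idx.store.items.filter (fun q => pvTo q.2 == nid) := by
      rw [hF]; exact List.mem_singleton_self _
    exact List.mem_of_mem_filter this
  have hGi : (o0, eout) ∈ idx.store.items := by
    have : (o0, eout) ∈ idx.store.items.filter (fun q => pvFrom q.2 == nid) := by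
      rw [hG]; exact List.mem_singleton_self _
    exact List.mem_of_mem_filter this
  have hFt : (pvTo einc == nid) = true := by
    have : (i0, einc) ∈ idx.store.items.filter (fun q => pvTo q.2 == nid) := by
      rw [hF]; exact List.mem_singleton_self _
    exact (List.mem_filter.1 this).2
  have hGt : (pvFrom eout == nid) = true := by
    have : (o0, eout) ∈ idx.store.items.filter (fun q => pvFrom q.2 == nid) := by
      rw [hG]; exact List.mem_singleton_self _
    exact (List.mem_filter.1 this).2
  have hto : ∀ q ∈ idx.store.items, (pvTo q.2 == nid) = (q.1 == i0) := by
    intro q hq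
    by_cases hc : pvTo q.2 = nid
    · have hm : q ∈ idx.store.items.filter (fun q => pvTo q.2 == nid) :=
        List.mem_filter.2 ⟨hq, by simp [hc]⟩
      rw [hF, List.mem_singleton] at hm
      rw [hm]; simp [hFt]
    · have hne : q.1 ≠ i0 := by
        intro he
        have hqe : q = (i0, einc) := pv_key_inj h2 hq hFi he
        exact hc (by rw [hqe]; exact beq_iff_eq.1 hFt)
      simp [hc, hne]
  have hfrom : ∀ q ∈ idx.store.items, (pvFrom q.2 == nid) = (q.1 == o0) := by
    intro q hq
    by_cases hc : pvFrom q.2 = nid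
    · have hm : q ∈ idx.store.items.filter (fun q => pvFrom q.2 == nid) :=
        List.mem_filter.2 ⟨hq, by simp [hc]⟩
      rw [hG, List.mem_singleton] at hm
      rw [hm]; simp [hGt]
    · have hne : q.1 ≠ o0 := by
        intro he
        have hqe : q = (o0, eout) := pv_key_inj h2 hq hGi he
        exact hc (by rw [hqe]; exact beq_iff_eq.1 hGt)
      simp [hc, hne]
  have hkey : ∀ q ∈ idx.store.items,
      ((!(pvTo q.2 == nid)) && !(pvFrom q.2 == nid)) = ((!(q.1 == i0)) && !(q.1 == o0)) := by
    intro q hq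
    rw [hto q hq, hfrom q hq]
  have hitems : ({ idx with store := (idx.store.erase i0).erase o0 } : PvIdx).store.items
      = idx.store.items.filter (fun q => !(q.1 == i0) && !(q.1 == o0)) := pvItems_erase2 _ _ _
  refine ⟨?_, ?_, ?_, ?_, ?_, ?_, ?_⟩
  · rw [hitems, h1, List.filter_map]
    refine congrArg _ ?_
    refine List.filter_congr ?_
    intro q hq
    simpa using hkey q hq
  · rw [hitems]
    exact (h2.sublist (List.Sublist.map _ List.filter_sublist))
  · intro k hk
    rw [hitems] at hk
    simp only [List.mem_map] at hk
    obtain ⟨q, hq, rfl⟩ := hk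
    exact h3 q.1 (List.mem_map_of_mem (List.mem_of_mem_filter hq))
  · exact h4
  · exact h5
  · intro x
    have hc := pvContains_erase2 idx.store i0 o0
    show (idx.inIdx.getD x []).filter _ = _
    have step1 : (idx.inIdx.getD x []).filter
          (fun i => ((idx.store.erase i0).erase o0).contains i)
        = ((idx.inIdx.getD x []).filter (fun i => idx.store.contains i)).filter
            (fun i => !(i == i0) && !(i == o0)) := by
      rw [List.filter_filter]
      refine List.filter_congr ?_
      intro i _
      rw [hc i, Bool.and_comm]
    rw [step1, h6 x, List.filter_map, hitems]
    rw [List.filter_filter, List.filter_filter]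
    refine congrArg _ ?_
    refine List.filter_congr ?_
    intro q _
    simp only [Function.comp_apply]
    rw [Bool.and_comm]
  · intro x
    have hc := pvContains_erase2 idx.store i0 o0
    show (idx.outIdx.getD x []).filter _ = _
    have step1 : (idx.outIdx.getD x []).filter
          (fun i => ((idx.store.erase i0).erase o0).contains i)
        = ((idx.outIdx.getD x []).filter (fun i => idx.store.contains i)).filter
            (fun i => !(i == i0) && !(i == o0)) := by
      rw [List.filter_filter]
      refine List.filter_congr ?_
      intro i _
      rw [hc i, Bool.and_comm]
    rw [step1, h7 x, List.filter_map, hitems]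
    rw [List.filter_filter, List.filter_filter]
    refine congrArg _ ?_
    refine List.filter_congr ?_
    intro q _
    simp only [Function.comp_apply]
    rw [Bool.and_comm]

theorem pvCore_eq (sc : List (String × String)) (ne : List (PySem.Dict String String))
    (idx0 : PvIdx) (p : String × List (String × String))
    (hact : pvActs.contains ((PySem.Dict.ofList p.2).getD "action" "") = true)
    (hI : pvInv ne idx0) :
    ∃ idx', pvStepBCore sc idx0 p.1 = ((pvStepA (sc, ne) p).1, some idx') ∧
      pvInv (pvStepA (sc, ne) p).2 idx' := by
  obtain ⟨h1, h2, h3, h4, h5, h6, h7⟩ := hI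
  have hIncA : ne.filter (fun e => pvTo e == p.1)
      = (idx0.store.items.filter (fun q => pvTo q.2 == p.1)).map (fun q => q.2) := by
    rw [h1, List.filter_map]
    exact congrArg _ (List.filter_congr (fun q _ => rfl))
  have hOutA : ne.filter (fun e => pvFrom e == p.1)
      = (idx0.store.items.filter (fun q => pvFrom q.2 == p.1)).map (fun q => q.2) := by
    rw [h1, List.filter_map]
    exact congrArg _ (List.filter_congr (fun q _ => rfl))
  have hIncB := h6 p.1
  have hOutB := h7 p.1
  by_cases hcond : ((idx0.store.items.filter (fun q => pvTo q.2 == p.1)).length == 1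
      && (idx0.store.items.filter (fun q => pvFrom q.2 == p.1)).length == 1) = true
  · obtain ⟨hlF, hlG⟩ := Bool.and_eq_true_iff.1 hcond
    obtain ⟨qF, hFe⟩ := List.length_eq_one_iff.1 (by exact Nat.beq_eq_true_eq _ _ ▸ hlF)
    obtain ⟨qG, hGe⟩ := List.length_eq_one_iff.1 (by exact Nat.beq_eq_true_eq _ _ ▸ hlG)
    obtain ⟨i0, einc⟩ := qF
    obtain ⟨o0, eout⟩ := qG
    have hmemF : (i0, einc) ∈ idx0.store.items :=
      List.mem_of_mem_filter (by rw [hFe]; exact List.mem_singleton_self _)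
    have hmemG : (o0, eout) ∈ idx0.store.items :=
      List.mem_of_mem_filter (by rw [hGe]; exact List.mem_singleton_self _)
    have hkeys : idx0.store.keys.Nodup := h2
    have hgetI : idx0.store.getD i0 PySem.Dict.empty = einc :=
      PySem.Dict.getD_of_get?_eq_some _ _ (PySem.Dict.get?_of_mem_items _ hmemF hkeys)
    have hgetO : idx0.store.getD o0 PySem.Dict.empty = eout :=
      PySem.Dict.getD_of_get?_eq_some _ _ (PySem.Dict.get?_of_mem_items _ hmemG hkeys)
    have hA : pvStepA (sc, ne) p
        = (sc ++ [(p.1, pvTo eout)],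
           ne.filter (fun e => !(pvTo e == p.1) && !(pvFrom e == p.1)) ++
             [PySem.Dict.ofList [("from", pvFrom einc), ("to", pvTo eout)]]) := by
      simp only [pvStepA, hact, if_true]
      rw [hIncA, hOutA, hFe, hGe]
      simp
    have hB : pvStepBCore sc idx0 p.1
        = (sc ++ [(p.1, pvTo eout)],
           some (pvRegister { idx0 with store := (idx0.store.erase i0).erase o0 }
             (PySem.Dict.ofList [("from", pvFrom einc), ("to", pvTo eout)]))) := by
      simp only [pvStepBCore]
      rw [hIncB, hOutB, hFe, hGe]
      simp [hgetI, hgetO]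
    refine ⟨pvRegister { idx0 with store := (idx0.store.erase i0).erase o0 }
      (PySem.Dict.ofList [("from", pvFrom einc), ("to", pvTo eout)]), ?_, ?_⟩
    · rw [hB, hA]
    · rw [hA]
      exact pvInv_register (pvInv_erase ⟨h1, h2, h3, h4, h5, h6, h7⟩ hFe hGe) _
  · have hA : pvStepA (sc, ne) p = (sc, ne) := by
      simp only [pvStepA, hact, if_true]
      rw [hIncA, hOutA]
      simp only [List.length_map]
      rw [if_neg (by simpa using hcond)]
    have hB : pvStepBCore sc idx0 p.1 = (sc, some idx0) := by
      simp only [pvStepBCore]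
      rw [hIncB, hOutB]
      simp only [List.length_map]
      rw [if_neg (by simpa using hcond)]
    refine ⟨idx0, ?_, ?_⟩
    · rw [hB, hA]
    · rw [hA]
      exact ⟨h1, h2, h3, h4, h5, h6, h7⟩

theorem pvStep_eq (edges0 : List (PySem.Dict String String))
    (sc : List (String × String)) (ne : List (PySem.Dict String String))
    (ob : Option PvIdx) (p : String × List (String × String))
    (hrel : match ob with | none => ne = edges0 | some idx => pvInv ne idx) :
    (pvStepA (sc, ne) p).1 = (pvStepB edges0 (sc, ob) p).1 ∧
    (match (pvStepB edges0 (sc, ob) p).2 with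
     | none => (pvStepA (sc, ne) p).2 = edges0
     | some idx => pvInv (pvStepA (sc, ne) p).2 idx) := by
  by_cases hact : pvActs.contains ((PySem.Dict.ofList p.2).getD "action" "") = true
  · have hI : ∀ (ob' : Option PvIdx),
        (match ob' with | none => ne = edges0 | some idx => pvInv ne idx) →
        pvInv ne (match ob' with
          | none => edges0.foldl pvRegister pvEmptyIdx
          | some i => i) := by
      intro ob' hr
      cases ob' with
      | none => rw [hr]; exact pvInv_build edges0
      | some i => exact hr
    obtain ⟨idx', hBeq, hInv⟩ := pvCore_eq sc ne _ p hact (hI ob hrel)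
    have hB : pvStepB edges0 (sc, ob) p = ((pvStepA (sc, ne) p).1, some idx') := by
      rw [pvStepB, if_pos hact]
      exact hBeq
    rw [hB]
    exact ⟨rfl, hInv⟩
  · have hA : pvStepA (sc, ne) p = (sc, ne) := by rw [pvStepA, if_neg hact]
    have hB : pvStepB edges0 (sc, ob) p = (sc, ob) := by rw [pvStepB, if_neg hact]
    rw [hA, hB]
    exact ⟨rfl, hrel⟩

theorem pvFold_eq (edges0 : List (PySem.Dict String String))
    (items : List (String × List (String × String)))
    (sc : List (String × String)) (ne : List (PySem.Dict String String))
    (ob : Option PvIdx)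
    (hrel : match ob with | none => ne = edges0 | some idx => pvInv ne idx) :
    (items.foldl pvStepA (sc, ne)).1 = (items.foldl (pvStepB edges0) (sc, ob)).1 ∧
    (match (items.foldl (pvStepB edges0) (sc, ob)).2 with
     | none => (items.foldl pvStepA (sc, ne)).2 = edges0
     | some idx => pvInv (items.foldl pvStepA (sc, ne)).2 idx) := by
  induction items generalizing sc ne ob with
  | nil => exact ⟨rfl, hrel⟩
  | cons p rest ih =>
    have h := pvStep_eq edges0 sc ne ob p hrel
    have hA : pvStepA (sc, ne) p = ((pvStepA (sc, ne) p).1, (pvStepA (sc, ne) p).2) := rfl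
    have hB : pvStepB edges0 (sc, ob) p
        = ((pvStepB edges0 (sc, ob) p).1, (pvStepB edges0 (sc, ob) p).2) := rfl
    simp only [List.foldl_cons]
    rw [hA, hB, ← h.1]
    exact ih _ _ _ h.2

-- ===== VERDICT (by name: the statement is the Claim_ definition above) =====
theorem find_shortcuts_py_spec : Claim_equal_find_shortcuts_py := by
  intro nodes edges _ _
  unfold Spec_find_shortcuts_py find_shortcuts_py find_shortcuts_py_alt
  obtain ⟨hfst, hsnd⟩ := pvFold_eq (edges.map (fun e => PySem.Dict.ofList e))
    ((PySem.Dict.ofList nodes).items) [] (edges.map (fun e => PySem.Dict.ofList e)) none rfl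
  cases hB : (((PySem.Dict.ofList nodes).items).foldl
      (pvStepB (edges.map (fun e => PySem.Dict.ofList e))) ([], none)).2 with
  | none =>
    rw [hB] at hsnd
    simp only [hfst, hB, hsnd]
  | some idx =>
    rw [hB] at hsnd
    simp only [hfst, hB, hsnd.1]
    rfl
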